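-- pv_equiv track=rewrite | github.com/I-am-Milind/backend-ai | main.py | verify_answer
-- ===== SOURCE A (Python) =====
-- def verify_answer(answer: str, sources: list) -> bool:
--     if not sources:
--         return False
--     red_flags = ["i think", "probably", "might be", "guess", "not sure"]
--     for f in red_flags:
--         if f in answer.lower():
--             return False
--     return True
-- ===== SOURCE B (Python) =====
-- RED_FLAGS = frozenset(["i think", "probably", "might be", "guess", "not sure"])
-- FLAG_LENGTHS = (5, 7, 8)  # the distinct lengths of the red-flag phrases
--
-- def verify_answer(answer: str, sources: list) -> bool:
--     if not sources:
--         return False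
--     s = answer.lower()
--     windows = {s[i:i + L] for L in FLAG_LENGTHS for i in range(len(s) - L + 1)}
--     return RED_FLAGS.isdisjoint(windows)
-- ===== Notes on version B (the rewrite author's own statement) =====
-- stated objective: alternative
-- what changed: Instead of A's per-phrase substring search over the answer, B enumerates every window of the three fixed phrase lengths of the lowered answer into a hash set once and returns whether that set is disjoint from the red-flag phrase set (Rabin-Karp-style fixed-window indexing).
import Mathlib
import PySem

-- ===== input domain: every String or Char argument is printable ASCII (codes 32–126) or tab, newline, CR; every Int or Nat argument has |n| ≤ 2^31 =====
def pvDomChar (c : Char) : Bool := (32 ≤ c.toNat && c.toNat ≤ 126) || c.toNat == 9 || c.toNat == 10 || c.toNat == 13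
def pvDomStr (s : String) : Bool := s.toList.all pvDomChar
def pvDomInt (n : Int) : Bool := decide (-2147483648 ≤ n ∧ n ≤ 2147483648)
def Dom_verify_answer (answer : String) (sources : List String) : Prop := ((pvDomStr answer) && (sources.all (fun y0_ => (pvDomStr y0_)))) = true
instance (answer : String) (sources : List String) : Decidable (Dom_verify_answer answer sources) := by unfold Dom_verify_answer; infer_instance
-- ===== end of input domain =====

-- B enumerates all fixed-length windows of the lowered answer into a set once and tests set
-- disjointness against the phrase set (Rabin–Karp-style), instead of A's per-phrase substring search.


-- ===== PORT A =====
-- A's red_flags list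
def redFlags : List String := ["i think", "probably", "might be", "guess", "not sure"]

-- A's loop: for f in red_flags: if f in answer.lower(): return False
def loopA (answer : String) : List String → Bool
  | [] => true
  | f :: rest => if PySem.Str.isIn f (PySem.Str.lower answer) then false else loopA answer rest

def verify_answer (answer : String) (sources : List String) : Bool :=
  if sources = [] then false
  else loopA answer redFlags

-- ===== PORT B =====
-- B's module constants: RED_FLAGS (a frozenset) and FLAG_LENGTHS
def redFlagSet : PySem.Set String :=
  PySem.Set.ofList ["i think", "probably", "might be", "guess", "not sure"]
def flagLens : List Int := [5, 7, 8]

-- B's set comprehension: {s[i:i+L] for L in FLAG_LENGTHS for i in range(len(s) - L + 1)}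
def windowsOf (s : String) : PySem.Set String :=
  flagLens.foldl
    (fun acc L =>
      (PySem.List.pyRange 0 (PySem.Str.len s - L + 1) 1).foldl
        (fun acc2 i => PySem.Set.add acc2 (PySem.Str.slice s (some i) (some (i + L)))) acc)
    PySem.Set.empty

def verify_answer_alt (answer : String) (sources : List String) : Bool :=
  if sources = [] then false
  else
    let s := PySem.Str.lower answer
    PySem.Set.isdisjoint redFlagSet (windowsOf s)

-- ===== PRECONDITION & SPEC =====
def Spec_verify_answer (answer : String) (sources : List String) (out : Bool) : Prop := out = verify_answer_alt answer sources
instance (answer : String) (sources : List String) (out : Bool) : Decidable (Spec_verify_answer answer sources out) := by unfold Spec_verify_answer; infer_instance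

-- ===== CLAIM (what is proved, stated in full; the proofs are below) =====
def Claim_equal_verify_answer : Prop := ∀ (answer : String) (sources : List String), Dom_verify_answer answer sources → Spec_verify_answer answer sources (verify_answer answer sources)

-- ===== LEMMAS AND PROOFS =====

-- membership in a set built by folding `add` over a list
lemma mem_foldl_add {α β : Type} [BEq α] [LawfulBEq α] (f : β → α) (l : List β)
    (acc : PySem.Set α) (x : α) :
    x ∈ l.foldl (fun a b => PySem.Set.add a (f b)) acc ↔ x ∈ acc ∨ ∃ b ∈ l, f b = x := by
  induction l generalizing acc with
  | nil => simp
  | cons b rest ih =>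
      simp only [List.foldl_cons, ih, PySem.Set.mem_add]
      constructor
      · rintro (⟨h | h⟩ | ⟨c, hc, h⟩)
        · exact Or.inl h
        · exact Or.inr ⟨b, by simp, h.symm⟩
        · exact Or.inr ⟨c, by simp [hc], h⟩
      · rintro (h | ⟨c, hc, h⟩)
        · exact Or.inl (Or.inl h)
        · rcases List.mem_cons.mp hc with rfl | hc
          · exact Or.inl (Or.inr h.symm)
          · exact Or.inr ⟨c, hc, h⟩

-- a string is in B's window set iff it is a slice s[i:i+L] for some flag length L and in-range i
lemma mem_windowsOf (s : String) (x : String) :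
    x ∈ windowsOf s ↔
      ∃ L ∈ flagLens, ∃ i : Int, 0 ≤ i ∧ i < PySem.Str.len s - L + 1 ∧
        PySem.Str.slice s (some i) (some (i + L)) = x := by
  unfold windowsOf flagLens
  simp only [List.foldl_cons, List.foldl_nil, mem_foldl_add]
  constructor
  · rintro (((h | ⟨i, hi, he⟩) | ⟨i, hi, he⟩) | ⟨i, hi, he⟩)
    · cases h
    · exact ⟨5, by simp, i, (PySem.List.mem_pyRange_one.mp hi).1,
        (PySem.List.mem_pyRange_one.mp hi).2, he⟩
    · exact ⟨7, by simp, i, (PySem.List.mem_pyRange_one.mp hi).1,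
        (PySem.List.mem_pyRange_one.mp hi).2, he⟩
    · exact ⟨8, by simp, i, (PySem.List.mem_pyRange_one.mp hi).1,
        (PySem.List.mem_pyRange_one.mp hi).2, he⟩
  · rintro ⟨L, hL, i, h0, h1, he⟩
    simp only [List.mem_cons, List.not_mem_nil, or_false] at hL
    rcases hL with rfl | rfl | rfl
    · exact Or.inl (Or.inl (Or.inr ⟨i, PySem.List.mem_pyRange_one.mpr ⟨h0, h1⟩, he⟩))
    · exact Or.inl (Or.inr ⟨i, PySem.List.mem_pyRange_one.mpr ⟨h0, h1⟩, he⟩)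
    · exact Or.inr ⟨i, PySem.List.mem_pyRange_one.mpr ⟨h0, h1⟩, he⟩

-- any nonnegative slice of a list is a contiguous infix of it
lemma slice_infix {α : Type} (t : List α) (a b : Int) (ha : 0 ≤ a) (hb : 0 ≤ b) :
    PySem.List.slice t (some a) (some b) <:+: t := by
  rw [PySem.List.slice_toNat t ha hb]
  exact ((List.take_prefix _ _).isInfix).trans ((List.drop_suffix _ _).isInfix)

-- an in-range slice equals a phrase iff the phrase occurs as a substring (list level)
lemma window_iff_infix (t p : List Char) (hp : p ≠ []) :
    (∃ i : Int, 0 ≤ i ∧ i < (t.length : Int) - p.length + 1 ∧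
        PySem.List.slice t (some i) (some (i + p.length)) = p) ↔ p <:+: t := by
  constructor
  · rintro ⟨i, h0, _, he⟩
    exact he ▸ slice_infix t i (i + p.length) h0 (by positivity)
  · intro hinf
    obtain ⟨u, v, huv⟩ := hinf
    refine ⟨(u.length : Int), by positivity, ?_, ?_⟩
    · have := congrArg List.length huv
      simp only [List.length_append] at this
      have hv : 0 ≤ (v.length : Int) := by positivity
      push_cast [← this]
      omega
    · rw [PySem.List.slice_natCast_add t u.length p.length, ← huv, List.append_assoc,
        List.drop_left, List.take_left]

-- A's early-return loop returns false exactly when some red flag occurs in the lowered answer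
lemma loopA_eq (answer : String) (fl : List String) :
    loopA answer fl = !(fl.any (fun f => PySem.Str.isIn f (PySem.Str.lower answer))) := by
  induction fl with
  | nil => simp [loopA]
  | cons f rest ih =>
      simp only [loopA, List.any_cons, ih]
      cases h : PySem.Str.isIn f (PySem.Str.lower answer) <;> simp [h]

-- per-phrase equivalence: a red flag is in the window set iff it occurs in the string
lemma flag_mem_windows_iff (s f : String) (hf : f ∈ redFlags) :
    f ∈ windowsOf s ↔ PySem.Str.isIn f s = true := by
  have hflag : ((f.toList.length : Int) ∈ flagLens) ∧ f.toList ≠ [] := by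
    simp only [redFlags, List.mem_cons, List.not_mem_nil, or_false] at hf
    rcases hf with rfl | rfl | rfl | rfl | rfl <;> exact ⟨by decide, by decide⟩
  have hisIn : PySem.Str.isIn f s = PySem.Chars.isIn f.toList s.toList := by
    simp [PySem.Str.isIn]
  rw [mem_windowsOf, hisIn, PySem.Chars.isIn_iff_infix]
  constructor
  · rintro ⟨L, hL, i, h0, _, he⟩
    have hL0 : 0 ≤ i + L := by
      simp only [flagLens, List.mem_cons, List.not_mem_nil, or_false] at hL
      rcases hL with rfl | rfl | rfl <;> omega
    have ht : PySem.List.slice s.toList (some i) (some (i + L)) = f.toList := by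
      rw [← he, PySem.Str.toList_slice]; rfl
    exact ht ▸ slice_infix s.toList i (i + L) h0 hL0
  · intro hinf
    obtain ⟨i, h0, h1, he⟩ := (window_iff_infix s.toList f.toList hflag.2).mpr hinf
    refine ⟨(f.toList.length : Int), hflag.1, i, h0, ?_, ?_⟩
    · rw [PySem.Str.len_eq]; exact h1
    · exact String.toList_inj.mp (by rw [PySem.Str.toList_slice]; exact he)

-- ===== VERDICT (by name: the statement is the Claim_ definition above) =====
theorem verify_answer_spec : Claim_equal_verify_answer := by
  intro answer sources _
  unfold Spec_verify_answer verify_answer verify_answer_alt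
  by_cases hs : sources = []
  · simp [hs]
  · simp only [hs, if_false]
    rw [loopA_eq]
    have hsets : ∀ x, x ∈ redFlagSet ↔ x ∈ redFlags := by
      intro x; simp [redFlagSet, PySem.Set.mem_ofList, redFlags]
    by_cases h : ∃ f ∈ redFlags, PySem.Str.isIn f (PySem.Str.lower answer) = true
    · rcases h with ⟨f, hf, hin⟩
      have h1 : redFlags.any (fun f => PySem.Str.isIn f (PySem.Str.lower answer)) = true :=
        List.any_eq_true.mpr ⟨f, hf, hin⟩
      have h2 : PySem.Set.isdisjoint redFlagSet (windowsOf (PySem.Str.lower answer)) = false := by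
        rcases hx : PySem.Set.isdisjoint redFlagSet (windowsOf (PySem.Str.lower answer)) with _ | _
        · rfl
        · exact absurd ((PySem.Set.isdisjoint_iff _ _).mp hx f ((hsets f).mpr hf))
            (by simpa using (flag_mem_windows_iff _ f hf).mpr hin)
      rw [h1, h2]; rfl
    · push_neg at h
      have h1 : redFlags.any (fun f => PySem.Str.isIn f (PySem.Str.lower answer)) = false := by
        rcases hx : redFlags.any (fun f => PySem.Str.isIn f (PySem.Str.lower answer)) with _ | _
        · rfl
        · rcases List.any_eq_true.mp hx with ⟨f, hf, hin⟩
          exact absurd hin (h f hf)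
      have h2 : PySem.Set.isdisjoint redFlagSet (windowsOf (PySem.Str.lower answer)) = true :=
        (PySem.Set.isdisjoint_iff _ _).mpr (fun f hf hw =>
          absurd ((flag_mem_windows_iff _ f ((hsets f).mp hf)).mp hw)
            (h f ((hsets f).mp hf)))
      rw [h1, h2]; rfl
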